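-- pv_equiv track=rewrite | github.com/cloudnative-pg/cloudnative-pg | .github/summarize_test_results.py | compute_bucketized_summary
-- ===== SOURCE A (Python) =====
-- def compute_bucketized_summary(parameter_buckets):
--     """counts the number of buckets with failures and the
--     total number of buckets
--     returns (num-failed-buckets, num-total-buckets)
--     """
--     failed_buckets_count = 0
--     total_buckets_count = 0
--     for _ in parameter_buckets["total"]:
--         total_buckets_count = 1 + total_buckets_count
--     for _ in parameter_buckets["failed"]:
--         failed_buckets_count = 1 + failed_buckets_count
--     return failed_buckets_count, total_buckets_count
-- ===== SOURCE B (Python) =====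
-- def compute_bucketized_summary(parameter_buckets):
--     """counts the number of buckets with failures and the
--     total number of buckets
--     returns (num-failed-buckets, num-total-buckets)
--     """
--     return len(parameter_buckets["failed"]), len(parameter_buckets["total"])
-- ===== Notes on version B (the rewrite author's own statement) =====
-- stated objective: idiomatic
-- what changed: Replaces the two manual counting loops (incrementing a counter per element) with direct len() lookups on the two buckets, returned as a tuple in the same (failed, total) order.
import Mathlib
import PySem

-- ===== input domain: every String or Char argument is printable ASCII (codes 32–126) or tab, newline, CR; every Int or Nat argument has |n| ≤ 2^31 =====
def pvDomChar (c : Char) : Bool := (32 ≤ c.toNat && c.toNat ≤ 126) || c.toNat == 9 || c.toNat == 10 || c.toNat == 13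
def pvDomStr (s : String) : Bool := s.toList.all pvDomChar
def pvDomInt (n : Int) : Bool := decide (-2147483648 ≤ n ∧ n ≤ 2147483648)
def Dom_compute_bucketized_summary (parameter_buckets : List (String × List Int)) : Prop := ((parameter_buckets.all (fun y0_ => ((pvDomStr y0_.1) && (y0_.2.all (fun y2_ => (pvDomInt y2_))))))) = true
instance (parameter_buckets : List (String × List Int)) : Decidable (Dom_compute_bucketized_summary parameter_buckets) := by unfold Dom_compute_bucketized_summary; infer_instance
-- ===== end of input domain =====

-- B replaces A's two element-by-element counting loops with direct length lookups (idiomatic).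

-- ===== PORT A =====
-- Literal port of A: look up "total", count its elements with a loop, then "failed",
-- count its elements with a loop, return (failed_count, total_count).
-- A missing key is a Python KeyError: excluded by Pre_; the (0, 0) branches are unreachable there.
def compute_bucketized_summary (parameter_buckets : List (String × List Int)) : Int × Int :=
  match (PySem.Dict.mk parameter_buckets).get? "total" with
  | none => (0, 0)
  | some total =>
    match (PySem.Dict.mk parameter_buckets).get? "failed" with
    | none => (0, 0)
    | some failed =>
      let total_buckets_count : Int := total.foldl (fun acc _ => 1 + acc) 0
      let failed_buckets_count : Int := failed.foldl (fun acc _ => 1 + acc) 0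
      (failed_buckets_count, total_buckets_count)

-- ===== PORT B =====
-- Port of B: len(parameter_buckets["failed"]), len(parameter_buckets["total"]).
-- (KeyError = none, excluded by Pre_; default [] only fills the unreachable branch.)
def compute_bucketized_summary_alt (parameter_buckets : List (String × List Int)) : Int × Int :=
  ((((PySem.Dict.mk parameter_buckets).get? "failed").getD []).length,
   (((PySem.Dict.mk parameter_buckets).get? "total").getD []).length)

-- ===== PRECONDITION & SPEC =====
-- Pre_ excludes exactly the inputs where Python A raises KeyError: the dict must carry
-- both the "failed" and the "total" key.
def Pre_compute_bucketized_summary (parameter_buckets : List (String × List Int)) : Prop :=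
  "total" ∈ parameter_buckets.map Prod.fst ∧ "failed" ∈ parameter_buckets.map Prod.fst
instance (parameter_buckets : List (String × List Int)) : Decidable (Pre_compute_bucketized_summary parameter_buckets) := by unfold Pre_compute_bucketized_summary; infer_instance
def pvWitness_compute_bucketized_summary : (List (String × List Int)) := [("failed", [1]), ("total", [1, 2])]
def Spec_compute_bucketized_summary (parameter_buckets : List (String × List Int)) (out : Int × Int) : Prop := out = compute_bucketized_summary_alt parameter_buckets
instance (parameter_buckets : List (String × List Int)) (out : Int × Int) : Decidable (Spec_compute_bucketized_summary parameter_buckets out) := by unfold Spec_compute_bucketized_summary; infer_instance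

-- ===== CLAIM (what is proved, stated in full; the proofs are below) =====
def Claim_equal_compute_bucketized_summary : Prop := ∀ (parameter_buckets : List (String × List Int)), Dom_compute_bucketized_summary parameter_buckets → Pre_compute_bucketized_summary parameter_buckets → Spec_compute_bucketized_summary parameter_buckets (compute_bucketized_summary parameter_buckets)

-- ===== LEMMAS AND PROOFS =====

-- A's counting loop computes the length.
theorem count_loop_eq_length (l : List Int) (acc : Int) :
    l.foldl (fun acc _ => 1 + acc) acc = acc + l.length := by
  induction l generalizing acc with
  | nil => simp
  | cons x xs ih => simp [List.foldl, ih]; omega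

-- A present key makes the first-match lookup succeed.
theorem get?_isSome_of_mem (k : String) (l : List (String × List Int))
    (h : k ∈ l.map Prod.fst) : ∃ v, (PySem.Dict.mk l).get? k = some v := by
  induction l with
  | nil => simp at h
  | cons p rest ih =>
    rw [PySem.Dict.get?_mk_cons]
    by_cases hk : p.1 == k
    · simp [hk]
    · simp [hk]
      apply ih
      simp at h hk ⊢
      rcases h with h | ⟨x, hx⟩
      · exact absurd h.symm hk
      · exact ⟨x, hx⟩

-- ===== VERDICT (by name: the statement is the Claim_ definition above) =====
theorem compute_bucketized_summary_spec : Claim_equal_compute_bucketized_summary := by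
  intro pb _ hpre
  obtain ⟨ht, hf⟩ := hpre
  obtain ⟨vt, hvt⟩ := get?_isSome_of_mem "total" pb ht
  obtain ⟨vf, hvf⟩ := get?_isSome_of_mem "failed" pb hf
  unfold Spec_compute_bucketized_summary compute_bucketized_summary compute_bucketized_summary_alt
  rw [hvt, hvf]
  simp [count_loop_eq_length]
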